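-- pv_equiv track=rewrite | github.com/locobastos/SudokuSolver | sudoku-solver.py | draw_separate_line
-- ===== SOURCE A (Python) =====
-- from math import ceil, floor
--
-- def draw_separate_line(total_columns, square_columns):
--     separate_line = "+-"
--     squares_number_by_row = ceil((int(total_columns) / int(square_columns)))
--     for square in range(squares_number_by_row):
--         for col in range(square_columns):
--             separate_line += "--"
--         separate_line += "+-"
--     separate_line = separate_line[:-1] + "\n"
--     return separate_line
-- ===== SOURCE B (Python) =====
-- def draw_separate_line(total_columns, square_columns):
--     squares = -(-int(total_columns) // int(square_columns))
--     if squares <= 0: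
--         # no squares to draw: the line is just the corner post
--         return "+\n"
--     return "+" + ("-" * (2 * square_columns + 1) + "+") * squares + "\n"
-- ===== Notes on version B (the rewrite author's own statement) =====
-- stated objective: faster
-- what changed: Replaces the nested per-square/per-column append loops and the trailing-slice fix-up by one closed-form expression: ceiling division for the square count and string multiplication of the periodic '-'*(2*square_columns+1)+'+' segment.
-- intended difference: When both arguments are negative A still iterates ceil(tc/sc) >= 1 times with an empty inner loop, returning a stray-dash artefact like '+-+-+-+\n'; B's periodic formula returns '+'*(squares+1)+'\n', the intended degenerate separator with no dashes for a nonpositive column count. — e.g. on draw_separate_line(-9, -3): A returns "+-+-+-+\n", B returns "++++\n"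
import Mathlib
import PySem

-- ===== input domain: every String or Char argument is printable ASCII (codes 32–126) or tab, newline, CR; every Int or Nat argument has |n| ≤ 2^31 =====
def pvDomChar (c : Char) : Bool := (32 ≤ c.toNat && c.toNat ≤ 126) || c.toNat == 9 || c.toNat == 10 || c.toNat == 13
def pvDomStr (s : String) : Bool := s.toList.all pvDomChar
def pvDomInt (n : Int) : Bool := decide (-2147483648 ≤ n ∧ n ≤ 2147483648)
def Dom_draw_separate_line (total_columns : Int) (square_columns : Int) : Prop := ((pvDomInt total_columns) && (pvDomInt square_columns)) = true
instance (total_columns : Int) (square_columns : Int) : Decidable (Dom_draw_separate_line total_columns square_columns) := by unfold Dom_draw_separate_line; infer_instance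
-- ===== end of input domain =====

-- B builds the separator as one closed-form string expression (ceiling division + repeated segment) instead of A's nested append loops and slice fix-up; they agree everywhere A returns except when both arguments are negative (see D_).

-- ===== PORT A =====
-- ceil(int(tc) / int(sc)): Python's float ceil equals exact ceiling -((-tc) // sc)
-- for all |tc|,|sc| ≤ 2^31 (|tc| < 2^53 makes the float rounding error smaller than
-- the distance 1/|sc| from the quotient to the next integer); ported as the exact form.
def draw_separate_line (total_columns : Int) (square_columns : Int) : String :=
  let separate_line : List Char := "+-".toList
  let squares_number_by_row : Int := -(PySem.Int.floordiv (-total_columns) square_columns)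
  let separate_line :=
    (PySem.List.pyRange 0 squares_number_by_row 1).foldl
      (fun s _ =>
        ((PySem.List.pyRange 0 square_columns 1).foldl (fun s _ => s ++ "--".toList) s)
          ++ "+-".toList)
      separate_line
  String.ofList (PySem.List.slice separate_line none (some (-1)) ++ "\n".toList)

-- ===== PORT B =====
def draw_separate_line_alt (total_columns : Int) (square_columns : Int) : String :=
  let squares : Int := -(PySem.Int.floordiv (-total_columns) square_columns)
  if squares ≤ 0 then String.ofList "+\n".toList
  else
    String.ofList ("+".toList ++
      PySem.List.pyRepeat (List.replicate (2 * square_columns + 1).toNat '-' ++ "+".toList) squares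
      ++ "\n".toList)

-- ===== PRECONDITION & SPEC =====
-- Pre_ excludes only square_columns = 0, on which Python A raises ZeroDivisionError.
def Pre_draw_separate_line (total_columns : Int) (square_columns : Int) : Prop := square_columns ≠ 0
instance (total_columns : Int) (square_columns : Int) : Decidable (Pre_draw_separate_line total_columns square_columns) := by unfold Pre_draw_separate_line; infer_instance
def pvWitness_draw_separate_line : Int × Int := (9, 3)

-- When both arguments are negative A still iterates ceil(tc/sc) ≥ 1 times with an empty inner loop, returning a stray-dash artefact like "+-+-+-+\n"; B returns '+'*(squares+1)+"\n", the intended degenerate separator with no dashes for a nonpositive column count.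
def D_draw_separate_line (total_columns : Int) (square_columns : Int) : Prop := total_columns < 0 ∧ square_columns < 0
instance (total_columns : Int) (square_columns : Int) : Decidable (D_draw_separate_line total_columns square_columns) := by unfold D_draw_separate_line; infer_instance

def Spec_draw_separate_line (total_columns : Int) (square_columns : Int) (out : String) : Prop := ¬ D_draw_separate_line total_columns square_columns → out = draw_separate_line_alt total_columns square_columns
instance (total_columns : Int) (square_columns : Int) (out : String) : Decidable (Spec_draw_separate_line total_columns square_columns out) := by unfold Spec_draw_separate_line; infer_instance

def pvDiffWitness_draw_separate_line : Int × Int := (-9, -3)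
def pvDiffWitnessOut_draw_separate_line : String × String := ("+-+-+-+\n", "++++\n")

-- ===== CLAIM (what is proved, stated in full; the proofs are below) =====
def Claim_unchanged_draw_separate_line : Prop := ∀ (total_columns : Int) (square_columns : Int), Dom_draw_separate_line total_columns square_columns → Pre_draw_separate_line total_columns square_columns → Spec_draw_separate_line total_columns square_columns (draw_separate_line total_columns square_columns)
def Claim_changed_draw_separate_line : Prop := Dom_draw_separate_line (pvDiffWitness_draw_separate_line.1) (pvDiffWitness_draw_separate_line.2) ∧ Pre_draw_separate_line (pvDiffWitness_draw_separate_line.1) (pvDiffWitness_draw_separate_line.2) ∧ D_draw_separate_line (pvDiffWitness_draw_separate_line.1) (pvDiffWitness_draw_separate_line.2) ∧ draw_separate_line (pvDiffWitness_draw_separate_line.1) (pvDiffWitness_draw_separate_line.2) = pvDiffWitnessOut_draw_separate_line.1 ∧ draw_separate_line_alt (pvDiffWitness_draw_separate_line.1) (pvDiffWitness_draw_separate_line.2) = pvDiffWitnessOut_draw_separate_line.2 ∧ pvDiffWitnessOut_draw_separate_line.1 ≠ pvDiffWitnessOut_draw_separate_line.2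
def Claim_exact_draw_separate_line : Prop := ∀ (total_columns : Int) (square_columns : Int), Dom_draw_separate_line total_columns square_columns → Pre_draw_separate_line total_columns square_columns → D_draw_separate_line total_columns square_columns → draw_separate_line total_columns square_columns ≠ draw_separate_line_alt total_columns square_columns

-- ===== LEMMAS AND PROOFS =====

-- a fold appending a constant list once per element is init ++ k copies of it
theorem foldl_append_const {α β : Type} (l : List α) (c : List β) (s : List β) :
    l.foldl (fun s _ => s ++ c) s = s ++ (List.replicate l.length c).flatten := by
  induction l generalizing s with
  | nil => simp
  | cons x xs ih => simp [List.foldl_cons, ih, List.replicate_succ, List.append_assoc]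

-- flattened copies of "--" are one run of dashes
theorem flatten_doubles (k : Nat) : (List.replicate k ['-','-']).flatten = List.replicate (2*k) '-' := by
  induction k with
  | zero => simp
  | succ n ih =>
      simp [List.replicate_succ, ih]
      rw [show 2*(n+1) = (2*n)+1+1 by omega]
      simp [List.replicate_succ]

-- rotating the leading '-' of A's accumulated body through the k blocks
theorem rotate_blocks (m k : Nat) :
    '-' :: (List.replicate k (List.replicate (2 * m) '-' ++ ['+', '-'])).flatten
      = (List.replicate k (List.replicate (2 * m + 1) '-' ++ ['+'])).flatten ++ ['-'] := by
  induction k with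
  | zero => simp
  | succ n ih =>
      simp only [List.replicate_succ, List.flatten_cons, List.append_assoc, List.cons_append,
        List.nil_append] at ih ⊢
      rw [← ih]

-- the floor quotient of a nonpositive by a negative is nonnegative
theorem floordiv_nonneg_of_nonpos_neg (a b : Int) (ha : a ≤ 0) (hb : b < 0) :
    0 ≤ PySem.Int.floordiv a b := by
  have hmb := PySem.Int.mod_neg_bounds a hb
  nlinarith [PySem.Int.floordiv_mul_add_mod a b]

-- the floor quotient of a positive by a negative is negative
theorem floordiv_neg_of_pos_neg (a b : Int) (ha : 0 < a) (hb : b < 0) :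
    PySem.Int.floordiv a b < 0 := by
  have hmb := PySem.Int.mod_neg_bounds a hb
  nlinarith [PySem.Int.floordiv_mul_add_mod a b]

-- structural form of A's result: "+" then n blocks of (2*sc dashes and a "+"), then "\n"
theorem A_closed (tc sc : Int) :
    (draw_separate_line tc sc).toList
      = '+' :: (List.replicate (-(PySem.Int.floordiv (-tc) sc)).toNat
            (List.replicate (2 * sc.toNat + 1) '-' ++ ['+'])).flatten ++ ['\n'] := by
  unfold draw_separate_line
  simp only []
  set n : Int := -(PySem.Int.floordiv (-tc) sc) with hn
  rw [show (fun (s : List Char) (_ : Int) =>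
        ((PySem.List.pyRange 0 sc 1).foldl (fun s _ => s ++ "--".toList) s) ++ "+-".toList)
      = (fun (s : List Char) (_ : Int) =>
        s ++ ((List.replicate (PySem.List.pyRange 0 sc 1).length "--".toList).flatten ++ "+-".toList))
    from funext fun s => funext fun _ => by rw [foldl_append_const]; simp [List.append_assoc]]
  rw [foldl_append_const]
  rw [PySem.List.slice_to_neg_one]
  simp only [PySem.List.length_pyRange_one, Int.sub_zero,
    show ("--".toList : List Char) = ['-','-'] from rfl,
    show ("+-".toList : List Char) = ['+','-'] from rfl]
  rw [flatten_doubles]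
  have h1 : ((['+','-'] : List Char) ++ (List.replicate n.toNat (List.replicate (2*sc.toNat) '-' ++ ['+','-'])).flatten)
      = ('+' :: (List.replicate n.toNat (List.replicate (2*sc.toNat+1) '-' ++ ['+'])).flatten) ++ ['-'] := by
    simp only [List.cons_append, List.nil_append, rotate_blocks]
  rw [h1, List.dropLast_concat]
  simp

-- structural form of B's result
theorem B_closed (tc sc : Int) :
    (draw_separate_line_alt tc sc).toList
      = '+' :: (List.replicate (-(PySem.Int.floordiv (-tc) sc)).toNat
            (List.replicate (2 * sc + 1).toNat '-' ++ ['+'])).flatten ++ ['\n'] := by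
  unfold draw_separate_line_alt
  simp only []
  split
  · next h =>
      rw [show (-(PySem.Int.floordiv (-tc) sc)).toNat = 0 from by omega]
      simp
  · simp [PySem.List.pyRepeat]

-- ===== VERDICT (by name: the statement is the Claim_ definition above) =====
theorem draw_separate_line_spec : Claim_unchanged_draw_separate_line := by
  intro tc sc _ hpre hnd
  show _ = _
  apply String.toList_injective
  rw [A_closed, B_closed]
  unfold Pre_draw_separate_line at hpre
  unfold D_draw_separate_line at hnd
  rcases lt_or_gt_of_ne hpre with hneg | hpos
  · -- sc < 0, so (by ¬D) tc ≥ 0, the square count is ≤ 0 and both sides degenerate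
    have htc : 0 ≤ tc := by by_contra h; exact hnd ⟨by omega, hneg⟩
    have hq : 0 ≤ PySem.Int.floordiv (-tc) sc :=
      floordiv_nonneg_of_nonpos_neg (-tc) sc (by omega) hneg
    rw [show (-(PySem.Int.floordiv (-tc) sc)).toNat = 0 from by omega]
    simp
  · -- sc > 0: the dash counts agree
    rw [show (2 * sc + 1).toNat = 2 * sc.toNat + 1 from by omega]

theorem draw_separate_line_changed : Claim_changed_draw_separate_line := by
  unfold Claim_changed_draw_separate_line; decide

theorem draw_separate_line_tight : Claim_exact_draw_separate_line := by
  intro tc sc _ _ hd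
  rcases hd with ⟨htc, hsc⟩
  intro heq
  have h := congrArg String.toList heq
  rw [A_closed, B_closed] at h
  have hq : PySem.Int.floordiv (-tc) sc < 0 :=
    floordiv_neg_of_pos_neg (-tc) sc (by omega) hsc
  set k : Nat := (-(PySem.Int.floordiv (-tc) sc)).toNat with hk
  have hk1 : 1 ≤ k := by omega
  have hlen := congrArg List.length h
  rw [show (2 * sc + 1).toNat = 0 from by omega] at hlen
  simp [List.length_flatten, List.sum_replicate, Nat.mul_add] at hlen
  omega
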